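-- pv_equiv track=rewrite | github.com/banggeut01/MyGoalIsAdPlus | swea/2383.py | go
-- ===== SOURCE A (Python) =====
-- def go(seq, t):
--     for i in range(len(seq)):
--         if i < 3: seq[i] += t
--         else:
--             if seq[i - 3] > seq[i]: seq[i] += (t + seq[i - 3] - seq[i])
--             else: seq[i] += t
--     if len(seq):
--         return seq[-1]
--     return 0
-- ===== SOURCE B (Python) =====
-- def go(seq, t):
--     # Processes the three independent chains (indices mod 3) separately,
--     # carrying the running chain value in an accumulator instead of
--     # re-reading seq[i-3]. Mutates seq in place like the original.
--     n = len(seq)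
--     for r in range(min(3, n)):
--         prev = seq[r] + t
--         seq[r] = prev
--         j = r + 3
--         while j < n:
--             prev = max(seq[j], prev) + t
--             seq[j] = prev
--             j += 3
--     return seq[-1] if seq else 0
-- ===== Notes on version B (the rewrite author's own statement) =====
-- stated objective: alternative
-- what changed: Instead of one in-order pass that re-reads seq[i-3] from the mutated array, B splits the DP into three independent residue-mod-3 chains and walks each with a scalar accumulator holding the previous chain value.
import Mathlib
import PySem

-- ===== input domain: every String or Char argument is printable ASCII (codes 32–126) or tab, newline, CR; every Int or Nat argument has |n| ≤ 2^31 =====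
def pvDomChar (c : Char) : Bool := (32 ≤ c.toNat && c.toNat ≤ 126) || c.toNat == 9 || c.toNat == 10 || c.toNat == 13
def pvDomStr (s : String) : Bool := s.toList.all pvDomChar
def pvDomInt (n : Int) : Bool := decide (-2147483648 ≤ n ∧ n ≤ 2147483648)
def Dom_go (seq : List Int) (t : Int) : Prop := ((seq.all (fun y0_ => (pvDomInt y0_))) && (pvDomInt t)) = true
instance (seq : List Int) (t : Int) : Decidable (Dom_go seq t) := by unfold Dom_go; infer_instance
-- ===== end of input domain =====

-- B replaces A's single in-order DP pass (which re-reads the mutated seq[i-3]) by three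
-- independent residue-mod-3 chain walks each carrying its running value in an accumulator;
-- equal return value, and both mutate the Python list the same way (equivalence proved on
-- the return value).


-- ===== PORT A =====
def goStepA (t : Int) (xs : List Int) (i : Int) : List Int :=
  if i < 3 then PySem.List.pySetD xs i (PySem.List.pyGetD xs i 0 + t)
  else
    let a := PySem.List.pyGetD xs (i - 3) 0
    let b := PySem.List.pyGetD xs i 0
    if a > b then PySem.List.pySetD xs i (b + (t + a - b))
    else PySem.List.pySetD xs i (b + t)

def go (seq : List Int) (t : Int) : Int :=
  let final := (PySem.List.pyRange 0 (seq.length : Int) 1).foldl (goStepA t) seq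
  if final.length ≠ 0 then PySem.List.pyGetD final (-1) 0 else 0

-- ===== PORT B =====
def goChainB (t : Int) (st : List Int × Int) (j : Int) : List Int × Int :=
  let prev := max (PySem.List.pyGetD st.1 j 0) st.2 + t
  (PySem.List.pySetD st.1 j prev, prev)

def goOuterB (t : Int) (n : Int) (xs : List Int) (r : Int) : List Int :=
  let prev := PySem.List.pyGetD xs r 0 + t
  let xs' := PySem.List.pySetD xs r prev
  ((PySem.List.pyRange (r + 3) n 3).foldl (goChainB t) (xs', prev)).1

def go_alt (seq : List Int) (t : Int) : Int :=
  let n : Int := seq.length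
  let final := (PySem.List.pyRange 0 (min 3 n) 1).foldl (goOuterB t n) seq
  if seq.isEmpty then 0 else PySem.List.pyGetD final (-1) 0

-- ===== PRECONDITION & SPEC =====
def Spec_go (seq : List Int) (t : Int) (out : Int) : Prop := out = go_alt seq t
instance (seq : List Int) (t : Int) (out : Int) : Decidable (Spec_go seq t out) := by unfold Spec_go; infer_instance

-- ===== CLAIM (what is proved, stated in full; the proofs are below) =====
def Claim_equal_go : Prop := ∀ (seq : List Int) (t : Int), Dom_go seq t → Spec_go seq t (go seq t)

-- ===== LEMMAS AND PROOFS =====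

-- the common functional spec: valFn seq t i is the final value at index i
def valFn (seq : List Int) (t : Int) : Nat → Int
  | 0 => seq.getD 0 0 + t
  | 1 => seq.getD 1 0 + t
  | 2 => seq.getD 2 0 + t
  | (i + 3) => max (seq.getD (i + 3) 0) (valFn seq t i) + t

theorem valFn_add_three (seq : List Int) (t : Int) (i : Nat) :
    valFn seq t (i + 3) = max (seq.getD (i + 3) 0) (valFn seq t i) + t := rfl

theorem valFn_lt_three (seq : List Int) (t : Int) (k : Nat) (hk : k < 3) :
    valFn seq t k = seq.getD k 0 + t := by
  interval_cases k <;> rfl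


theorem getD_set_int (l : List Int) (i j : Nat) (v d : Int) :
    (l.set i v).getD j d = if i = j ∧ i < l.length then v else l.getD j d := by
  simp only [List.getD_eq_getElem?_getD, List.getElem?_set]
  by_cases h1 : i = j <;> by_cases h2 : i < l.length <;> simp_all <;> rw [if_neg (by omega), if_neg (by omega)] <;> rfl

-- A-side invariant: after the first k loop iterations, positions below k hold valFn, the rest are untouched
theorem foldA_inv (seq : List Int) (t : Int) (k : Nat) (hk : k ≤ seq.length) :
    ((List.range k).foldl (fun (xs : List Int) (i : Nat) => goStepA t xs (i : Int)) seq).length = seq.length ∧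
    ∀ j : Nat, j < seq.length →
      ((List.range k).foldl (fun (xs : List Int) (i : Nat) => goStepA t xs (i : Int)) seq).getD j 0
        = if j < k then valFn seq t j else seq.getD j 0 := by
  induction k with
  | zero => simp
  | succ k ih =>
    obtain ⟨ihlen, ihval⟩ := ih (by omega)
    rw [List.range_succ, List.foldl_append]
    set res := (List.range k).foldl (fun (xs : List Int) (i : Nat) => goStepA t xs (i : Int)) seq with hres
    simp only [List.foldl_cons, List.foldl_nil]
    have hklen : k < seq.length := by omega
    by_cases hk3 : k < 3
    · have h3 : ((k : Int) < 3) := by exact_mod_cast hk3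
      unfold goStepA
      rw [if_pos h3]
      simp only [PySem.List.pyGetD_natCast, PySem.List.pySetD_natCast]
      refine ⟨by simp [ihlen], ?_⟩
      intro j hj
      rw [getD_set_int]
      by_cases hjk : k = j
      · subst hjk
        rw [if_pos ⟨rfl, by omega⟩, if_pos (by omega)]
        rw [ihval k hklen, if_neg (by omega), valFn_lt_three seq t k hk3]
      · rw [if_neg (by simp [hjk]), ihval j hj]
        by_cases hlt : j < k
        · rw [if_pos hlt, if_pos (by omega)]
        · rw [if_neg hlt, if_neg (by omega)]
    · have h3 : ¬ ((k : Int) < 3) := by exact_mod_cast hk3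
      unfold goStepA
      rw [if_neg h3]
      have hcast : (k : Int) - 3 = ((k - 3 : Nat) : Int) := by omega
      rw [hcast]
      simp only [PySem.List.pyGetD_natCast, PySem.List.pySetD_natCast]
      have ha : res.getD (k - 3) 0 = valFn seq t (k - 3) := by
        rw [ihval (k - 3) (by omega), if_pos (by omega)]
      have hb : res.getD k 0 = seq.getD k 0 := by
        rw [ihval k hklen, if_neg (by omega)]
      have hval : valFn seq t k = max (seq.getD k 0) (valFn seq t (k - 3)) + t := by
        have hk' : k = (k - 3) + 3 := by omega
        rw [hk']; rfl
      have hset : ∀ v : Int, ((res.set k v).length = seq.length) := by simp [ihlen]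
      have key : ∀ j, j < seq.length →
          (if res.getD (k - 3) 0 > res.getD k 0
            then res.set k (res.getD k 0 + (t + res.getD (k - 3) 0 - res.getD k 0))
            else res.set k (res.getD k 0 + t)).getD j 0
          = if j < k + 1 then valFn seq t j else seq.getD j 0 := by
        intro j hj
        have hres_j : (res.set k (max (seq.getD k 0) (valFn seq t (k - 3)) + t)).getD j 0
            = if j < k + 1 then valFn seq t j else seq.getD j 0 := by
          rw [getD_set_int]
          by_cases hjk : k = j
          · subst hjk
            rw [if_pos ⟨rfl, by omega⟩, if_pos (by omega), hval]
          · rw [if_neg (by simp [hjk]), ihval j hj]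
            by_cases hlt : j < k
            · rw [if_pos hlt, if_pos (by omega)]
            · rw [if_neg hlt, if_neg (by omega)]
        by_cases hgt : res.getD (k - 3) 0 > res.getD k 0
        · rw [if_pos hgt]
          have : res.getD k 0 + (t + res.getD (k - 3) 0 - res.getD k 0)
              = max (seq.getD k 0) (valFn seq t (k - 3)) + t := by
            rw [ha, hb] at hgt ⊢
            rw [max_eq_right (le_of_lt hgt)]; ring
          rw [this, hres_j]
        · rw [if_neg hgt]
          have : res.getD k 0 + t = max (seq.getD k 0) (valFn seq t (k - 3)) + t := by
            rw [ha, hb] at hgt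
            rw [hb, max_eq_left (by omega)]
          rw [this, hres_j]
      constructor
      · by_cases hgt : res.getD (k - 3) 0 > res.getD k 0
        · rw [if_pos hgt]; exact hset _
        · rw [if_neg hgt]; exact hset _
      · exact key

-- B-side chain invariant: folding the residue-r chain sets valFn at the processed positions and carries valFn in the accumulator
theorem chainB_inv (seq : List Int) (t : Int) (r : Nat) (hr : r < 3) (xs0 : List Int) (m : Nat)
    (hm : ∀ k, k < m → r + 3 + 3 * k < seq.length)
    (hlen : xs0.length = seq.length)
    (hpos : ∀ j, j < seq.length → j % 3 = r → r < j → xs0.getD j 0 = seq.getD j 0) :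
    (((List.range m).foldl (fun (st : List Int × Int) (k : Nat) => goChainB t st (((r : Int) + 3) + 3 * (k : Int))) (xs0, valFn seq t r)).1.length = seq.length) ∧
    (((List.range m).foldl (fun (st : List Int × Int) (k : Nat) => goChainB t st (((r : Int) + 3) + 3 * (k : Int))) (xs0, valFn seq t r)).2 = valFn seq t (r + 3 * m)) ∧
    ∀ j : Nat, j < seq.length →
      ((List.range m).foldl (fun (st : List Int × Int) (k : Nat) => goChainB t st (((r : Int) + 3) + 3 * (k : Int))) (xs0, valFn seq t r)).1.getD j 0
        = if j % 3 = r ∧ r < j ∧ j ≤ r + 3 * m then valFn seq t j else xs0.getD j 0 := by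
  induction m with
  | zero =>
    refine ⟨hlen, by simp, ?_⟩
    intro j hj
    rw [if_neg (by omega)]
    simp
  | succ m ih =>
    obtain ⟨ihlen, ihsnd, ihval⟩ := ih (fun k hk => hm k (by omega))
    rw [List.range_succ, List.foldl_append]
    set st := (List.range m).foldl (fun (st : List Int × Int) (k : Nat) => goChainB t st (((r : Int) + 3) + 3 * (k : Int))) (xs0, valFn seq t r) with hst
    simp only [List.foldl_cons, List.foldl_nil]
    have hcast : ((r : Int) + 3) + 3 * ((m : Nat) : Int) = ((r + 3 + 3 * m : Nat) : Int) := by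
      push_cast; ring
    have hjn : r + 3 + 3 * m < seq.length := hm m (by omega)
    have hread : st.1.getD (r + 3 + 3 * m) 0 = seq.getD (r + 3 + 3 * m) 0 := by
      rw [ihval _ hjn, if_neg (by omega), hpos _ hjn (by omega) (by omega)]
    have hprev : max (st.1.getD (r + 3 + 3 * m) 0) st.2 + t = valFn seq t (r + 3 * (m + 1)) := by
      rw [hread, ihsnd]
      have harg : r + 3 * (m + 1) = (r + 3 * m) + 3 := by omega
      have harg2 : r + 3 + 3 * m = (r + 3 * m) + 3 := by omega
      rw [harg, harg2, valFn_add_three]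
    simp only [goChainB, hcast, PySem.List.pyGetD_natCast, PySem.List.pySetD_natCast]
    refine ⟨by simp [ihlen], by rw [hprev], ?_⟩
    intro j hj
    rw [getD_set_int, hprev]
    by_cases hj0 : r + 3 + 3 * m = j
    · subst hj0
      rw [if_pos ⟨rfl, by omega⟩, if_pos (by omega)]
      congr 1
      omega
    · rw [if_neg (by simp [hj0]), ihval j hj]
      by_cases hc : j % 3 = r ∧ r < j ∧ j ≤ r + 3 * m
      · rw [if_pos hc, if_pos (by omega)]
      · rw [if_neg hc, if_neg (by omega)]

-- B-side outer invariant: after the first R residue chains, positions of residue < R hold valFn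
theorem outerB_inv (seq : List Int) (t : Int) (R : Nat) (hR : R ≤ min 3 seq.length) :
    ((List.range R).foldl (fun (xs : List Int) (r : Nat) => goOuterB t (seq.length : Int) xs (r : Int)) seq).length = seq.length ∧
    ∀ j : Nat, j < seq.length →
      ((List.range R).foldl (fun (xs : List Int) (r : Nat) => goOuterB t (seq.length : Int) xs (r : Int)) seq).getD j 0
        = if j % 3 < R then valFn seq t j else seq.getD j 0 := by
  induction R with
  | zero =>
    refine ⟨rfl, ?_⟩
    intro j hj
    rw [if_neg (by omega)]
    simp
  | succ R ih =>
    obtain ⟨ihlen, ihval⟩ := ih (by omega)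
    rw [List.range_succ, List.foldl_append]
    set xs := (List.range R).foldl (fun (xs : List Int) (r : Nat) => goOuterB t (seq.length : Int) xs (r : Int)) seq with hxs
    simp only [List.foldl_cons, List.foldl_nil]
    have hR3 : R < 3 := by omega
    have hRn : R < seq.length := by omega
    have hprev : PySem.List.pyGetD xs (R : Int) 0 + t = valFn seq t R := by
      rw [PySem.List.pyGetD_natCast, ihval R hRn, if_neg (by omega), valFn_lt_three seq t R hR3]
    set M : Nat := (if ((R : Int) + 3) < ((seq.length : Int)) then (((seq.length : Int) - ((R : Int) + 3) + 3 - 1) / 3).toNat else 0) with hM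
    have hrange : PySem.List.pyRange ((R : Int) + 3) ((seq.length : Int)) 3
        = (List.range M).map (fun (k : Nat) => ((R : Int) + 3) + 3 * (k : Int)) := by
      rw [PySem.List.pyRange_of_pos _ _ (by norm_num)]
    have hub : ∀ k, k < M → R + 3 + 3 * k < seq.length := by
      intro k hk
      by_cases hlt : ((R : Int) + 3) < ((seq.length : Int))
      · rw [if_pos hlt] at hM
        omega
      · rw [if_neg hlt] at hM
        omega
    have hcov : ∀ j, j < seq.length → j % 3 = R → R < j → j ≤ R + 3 * M := by
      intro j hj hjr hrj
      by_cases hlt : ((R : Int) + 3) < ((seq.length : Int))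
      · rw [if_pos hlt] at hM
        omega
      · rw [if_neg hlt] at hM
        omega
    have hlen' : (xs.set R (valFn seq t R)).length = seq.length := by simp [ihlen]
    have hpos' : ∀ j, j < seq.length → j % 3 = R → R < j →
        (xs.set R (valFn seq t R)).getD j 0 = seq.getD j 0 := by
      intro j hj hjr hrj
      rw [getD_set_int, if_neg (by omega), ihval j hj, if_neg (by omega)]
    obtain ⟨hlenC, _, hv⟩ := chainB_inv seq t R hR3 (xs.set R (valFn seq t R)) M hub hlen' hpos'
    simp only [goOuterB, hprev, PySem.List.pySetD_natCast, hrange, List.foldl_map]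
    refine ⟨hlenC, ?_⟩
    intro j hj
    rw [hv j hj]
    by_cases hj0 : j = R
    · subst hj0
      rw [if_neg (by omega), getD_set_int, if_pos ⟨rfl, by omega⟩, if_pos (by omega)]
    · by_cases hc : j % 3 = R ∧ R < j ∧ j ≤ R + 3 * M
      · rw [if_pos hc, if_pos (by omega)]
      · rw [if_neg hc, getD_set_int, if_neg (by simp [Ne.symm hj0]), ihval j hj]
        by_cases hlt : j % 3 < R
        · rw [if_pos hlt, if_pos (by omega)]
        · rw [if_neg hlt, if_neg ?_]
          intro hcon
          have hjr : j % 3 = R := by omega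
          exact hc ⟨hjr, by omega, hcov j hj hjr (by omega)⟩

theorem go_eq_valFn (seq : List Int) (t : Int) (h : seq ≠ []) :
    go seq t = valFn seq t (seq.length - 1) := by
  have hn : 0 < seq.length := List.length_pos_iff.mpr h
  obtain ⟨hlen, hval⟩ := foldA_inv seq t seq.length le_rfl
  simp only [go, PySem.List.pyRange_zero_nat, List.foldl_map]
  set final := (List.range seq.length).foldl (fun (xs : List Int) (i : Nat) => goStepA t xs (i : Int)) seq with hfin
  have h' : final ≠ [] := by
    intro hc
    rw [hc] at hlen
    simp at hlen
    omega
  rw [if_pos (by rw [hlen]; omega), PySem.List.pyGetD_neg_one _ _ h', List.getLast_eq_getElem]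
  have hgetD : final.getD (final.length - 1) 0 = valFn seq t (seq.length - 1) := by
    rw [hval _ (by omega), if_pos (by omega)]
    congr 1
    omega
  rw [← hgetD]
  simp [List.getD_eq_getElem?_getD, List.getElem?_eq_getElem (show final.length - 1 < final.length by omega)]

theorem go_alt_eq_valFn (seq : List Int) (t : Int) (h : seq ≠ []) :
    go_alt seq t = valFn seq t (seq.length - 1) := by
  have hn : 0 < seq.length := List.length_pos_iff.mpr h
  obtain ⟨hlen, hval⟩ := outerB_inv seq t (min 3 seq.length) le_rfl
  have hmin : min 3 ((seq.length : Int)) = ((min 3 seq.length : Nat) : Int) := by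
    push_cast
    rfl
  have hemp : seq.isEmpty = false := by simp [h]
  simp only [go_alt, hmin, PySem.List.pyRange_zero_nat, List.foldl_map, hemp, Bool.false_eq_true,
    if_false]
  set final := (List.range (min 3 seq.length)).foldl
      (fun (xs : List Int) (r : Nat) => goOuterB t (seq.length : Int) xs (r : Int)) seq with hfin
  have h' : final ≠ [] := by
    intro hc
    rw [hc] at hlen
    simp at hlen
    omega
  rw [PySem.List.pyGetD_neg_one _ _ h', List.getLast_eq_getElem]
  have hgetD : final.getD (final.length - 1) 0 = valFn seq t (seq.length - 1) := by
    rw [hval _ (by omega), if_pos (by omega)]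
    congr 1
    omega
  rw [← hgetD]
  simp [List.getD_eq_getElem?_getD, List.getElem?_eq_getElem (show final.length - 1 < final.length by omega)]

-- ===== VERDICT (by name: the statement is the Claim_ definition above) =====
theorem go_spec : Claim_equal_go := by
  intro seq t _
  unfold Spec_go
  cases seq with
  | nil => rfl
  | cons x xs =>
    rw [go_eq_valFn _ t (by simp), go_alt_eq_valFn _ t (by simp)]
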